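-- pv_equiv track=rewrite | github.com/dlewissandy/teaparty | bridge/server.py | _parse_artifacts
-- ===== SOURCE A (Python) =====
-- def _parse_artifacts(content: str) -> dict[str, str]:
--     """Parse markdown headings into a section dict.
--
--     Returns {heading_text: section_body} for each ## heading found.
--     """
--     sections: dict[str, str] = {}
--     current_heading: str | None = None
--     current_lines: list[str] = []
--
--     for line in content.splitlines():
--         if line.startswith('## '):
--             if current_heading is not None:
--                 sections[current_heading] = '\n'.join(current_lines).strip()
--             current_heading = line[3:].strip()
--             current_lines = []
--         elif current_heading is not None:
--             current_lines.append(line)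
--
--     if current_heading is not None:
--         sections[current_heading] = '\n'.join(current_lines).strip()
--
--     return sections
-- ===== SOURCE B (Python) =====
-- def _parse_artifacts(content: str) -> dict[str, str]:
--     """Parse markdown ## headings into a section dict (boundary-scan decomposition)."""
--     lines = content.splitlines()
--     # drop the preamble before the first heading
--     while lines and not lines[0].startswith('## '):
--         lines.pop(0)
--     sections: dict[str, str] = {}
--     while lines:
--         heading = lines.pop(0)[3:].strip()
--         body: list[str] = []
--         while lines and not lines[0].startswith('## '):
--             body.append(lines.pop(0))
--         sections[heading] = '\n'.join(body).strip()
--     return sections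
-- ===== Notes on version B (the rewrite author's own statement) =====
-- stated objective: alternative
-- what changed: Replaces A's flush-on-transition accumulator (heading/body state carried across one scan, flushed on each new heading and at EOF) with a boundary-scan decomposition: drop the preamble, then repeatedly pop a heading and span off its body lines, storing each section as it completes.
import Mathlib
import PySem

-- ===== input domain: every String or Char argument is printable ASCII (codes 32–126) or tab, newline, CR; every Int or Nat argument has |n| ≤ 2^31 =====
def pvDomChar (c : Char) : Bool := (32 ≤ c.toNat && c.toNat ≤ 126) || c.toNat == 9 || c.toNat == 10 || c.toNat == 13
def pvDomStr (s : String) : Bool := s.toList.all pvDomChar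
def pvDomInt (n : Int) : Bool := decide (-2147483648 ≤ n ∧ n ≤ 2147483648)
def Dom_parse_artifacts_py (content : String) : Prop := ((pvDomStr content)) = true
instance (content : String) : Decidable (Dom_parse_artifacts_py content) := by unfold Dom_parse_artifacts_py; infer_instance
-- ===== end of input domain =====

-- B replaces A's flush-on-transition accumulator with a boundary scan: drop the preamble,
-- then repeatedly take a heading and span off its body lines (objective: alternative decomposition).

-- ===== PORT A =====
-- state: (sections, current_heading, current_lines)
def pvStepA (st : PySem.Dict String String × Option String × List String) (line : String) :
    PySem.Dict String String × Option String × List String :=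
  let (sections, cur, curLines) := st
  if PySem.Str.startswith line "## " then
    let sections :=
      match cur with
      | some h => sections.insert h (PySem.Str.strip (PySem.Str.join "\n" curLines))
      | none => sections
    (sections, some (PySem.Str.strip (PySem.Str.slice line (some 3) none)), [])
  else
    match cur with
    | some _ => (sections, cur, curLines ++ [line])
    | none => (sections, cur, curLines)

def parse_artifacts_py (content : String) : List (String × String) :=
  let st := (PySem.Str.splitlines content).foldl pvStepA (PySem.Dict.empty, none, [])
  (match st.2.1 with
   | some h => st.1.insert h (PySem.Str.strip (PySem.Str.join "\n" st.2.2))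
   | none => st.1).items

-- ===== PORT B =====
-- while lines and not lines[0].startswith('## '): lines.pop(0)
def pvDropPre : List String → List String
  | [] => []
  | l :: ls => if PySem.Str.startswith l "## " then l :: ls else pvDropPre ls

-- inner while: pop body lines until the next heading; returns (body, remaining lines)
def pvSpanBody : List String → List String × List String
  | [] => ([], [])
  | l :: ls =>
    if PySem.Str.startswith l "## " then ([], l :: ls)
    else
      let (b, rest) := pvSpanBody ls
      (l :: b, rest)

theorem pvSpanBody_snd_le : ∀ ls : List String, (pvSpanBody ls).2.length ≤ ls.length := by
  intro ls
  induction ls with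
  | nil => simp [pvSpanBody]
  | cons l ls ih =>
    simp only [pvSpanBody]
    split
    · simp
    · simpa using Nat.le_succ_of_le ih

-- outer while: heading := lines.pop(0)[3:].strip(); body := span; sections[heading] = body
def pvSections : List String → PySem.Dict String String → PySem.Dict String String
  | [], sections => sections
  | l :: ls, sections =>
    pvSections (pvSpanBody ls).2
      (sections.insert (PySem.Str.strip (PySem.Str.slice l (some 3) none))
        (PySem.Str.strip (PySem.Str.join "\n" (pvSpanBody ls).1)))
  termination_by ls => ls.length
  decreasing_by
    have := pvSpanBody_snd_le ls
    simp only [List.length_cons]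
    omega

def parse_artifacts_py_alt (content : String) : List (String × String) :=
  (pvSections (pvDropPre (PySem.Str.splitlines content)) PySem.Dict.empty).items

-- ===== PRECONDITION & SPEC =====
def Spec_parse_artifacts_py (content : String) (out : List (String × String)) : Prop := out = parse_artifacts_py_alt content
instance (content : String) (out : List (String × String)) : Decidable (Spec_parse_artifacts_py content out) := by unfold Spec_parse_artifacts_py; infer_instance

-- ===== CLAIM (what is proved, stated in full; the proofs are below) =====
def Claim_equal_parse_artifacts_py : Prop := ∀ (content : String), Dom_parse_artifacts_py content → Spec_parse_artifacts_py content (parse_artifacts_py content)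

-- ===== LEMMAS AND PROOFS =====

theorem pvSections_nil (d : PySem.Dict String String) : pvSections [] d = d := by
  rw [pvSections]

theorem pvSections_cons (l : String) (ls : List String) (d : PySem.Dict String String) :
    pvSections (l :: ls) d =
      pvSections (pvSpanBody ls).2
        (d.insert (PySem.Str.strip (PySem.Str.slice l (some 3) none))
          (PySem.Str.strip (PySem.Str.join "\n" (pvSpanBody ls).1))) := by
  rw [pvSections]

-- finish step of A: flush the trailing section
def pvFinishA (st : PySem.Dict String String × Option String × List String) :
    PySem.Dict String String :=
  match st.2.1 with
  | some h => st.1.insert h (PySem.Str.strip (PySem.Str.join "\n" st.2.2))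
  | none => st.1

-- Main invariant: with a live heading h and accumulated acc, A's remaining loop + flush
-- equals: span off the body, store heading, continue with B's section loop.
theorem pvLoopA_some (lines : List String) :
    ∀ (d : PySem.Dict String String) (h : String) (acc : List String),
      pvFinishA (lines.foldl pvStepA (d, some h, acc)) =
        pvSections (pvSpanBody lines).2
          (d.insert h (PySem.Str.strip (PySem.Str.join "\n" (acc ++ (pvSpanBody lines).1)))) := by
  induction lines with
  | nil =>
    intro d h acc
    simp only [List.foldl_nil, pvFinishA, pvSpanBody, pvSections_nil, List.append_nil]
  | cons l ls ih =>
    intro d h acc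
    rw [pvSpanBody]
    by_cases hl : PySem.Str.startswith l "## " = true
    · rw [if_pos hl, List.foldl_cons]
      simp only [pvStepA, hl, if_pos]
      rw [ih, pvSections_cons]
      simp only [List.nil_append, List.append_nil]
    · rw [if_neg hl, List.foldl_cons]
      simp only [pvStepA, hl, if_neg, Bool.false_eq_true, not_false_iff]
      rw [ih]
      simp only [List.append_assoc, List.singleton_append]

-- Preamble: while no heading has been seen, A's loop drops lines, matching pvDropPre.
theorem pvLoopA_none (lines : List String) :
    pvFinishA (lines.foldl pvStepA (PySem.Dict.empty, none, [])) =
      pvSections (pvDropPre lines) PySem.Dict.empty := by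
  induction lines with
  | nil => simp only [List.foldl_nil, pvFinishA, pvDropPre, pvSections_nil]
  | cons l ls ih =>
    rw [pvDropPre]
    by_cases hl : PySem.Str.startswith l "## " = true
    · rw [if_pos hl, List.foldl_cons]
      simp only [pvStepA, hl, if_pos]
      rw [pvLoopA_some, pvSections_cons]
      simp only [List.nil_append]
    · rw [if_neg hl, List.foldl_cons]
      simp only [pvStepA, hl, if_neg, Bool.false_eq_true, not_false_iff]
      exact ih

-- ===== VERDICT (by name: the statement is the Claim_ definition above) =====
theorem parse_artifacts_py_spec : Claim_equal_parse_artifacts_py := by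
  intro content _
  unfold Spec_parse_artifacts_py parse_artifacts_py parse_artifacts_py_alt
  have := pvLoopA_none (PySem.Str.splitlines content)
  simp only [pvFinishA] at this
  simp only [this]
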